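-- pv_equiv track=rewrite | github.com/zhouhao4221/requirement-workflow-plugin | plugins/diag/scripts/check-remote.py | check_tmp_segment
-- ===== SOURCE A (Python) =====
-- def is_tmp_path(token, prefix):
--     return bool(prefix and token and token.startswith(prefix))
--
-- def check_tmp_segment(seg, prefix):
--     """返回 (ok, reason, paths)"""
--     if not prefix:
--         return False, "tmp whitelist disabled (no DIAG_SESSION_ID)", []
--     verb = seg[0].rsplit("/", 1)[-1]
--     args = seg[1:]
--     paths = []
--
--     if verb == "mktemp":
--         for a in args:
--             if a.startswith("-"):
--                 return False, f"mktemp options disallowed: {a}", []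
--             if not is_tmp_path(a, prefix):
--                 return False, f"mktemp target not in tmp whitelist: {a}", []
--             paths.append(a)
--         if not paths:
--             return False, "mktemp requires explicit template under tmp prefix", []
--         return True, None, paths
--
--     if verb == "tee":
--         has_append = False
--         for a in args:
--             if a in ("-a", "--append"):
--                 has_append = True
--                 continue
--             if a.startswith("-"):
--                 return False, f"tee only allows -a/--append, got: {a}", []
--             if not is_tmp_path(a, prefix):
--                 return False, f"tee target not in tmp whitelist: {a}", []
--             paths.append(a)
--         if not has_append:
--             return False, "tee must use -a (naked tee overwrites)", []
--         if not paths: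
--             return False, "tee needs at least one tmp target", []
--         return True, None, paths
--
--     if verb == "rm":
--         for a in args:
--             if a == "-f":
--                 continue
--             if a.startswith("-"):
--                 return False, f"rm only allows -f (no recursive/interactive flags): {a}", []
--             if not is_tmp_path(a, prefix):
--                 return False, f"rm target not in tmp whitelist: {a}", []
--             paths.append(a)
--         if not paths:
--             return False, "rm needs at least one tmp target", []
--         return True, None, paths
--
--     return False, f"verb not tmp-whitelisted: {verb}", []
-- ===== SOURCE B (Python) =====
-- # Staged re-implementation: instead of one accumulating loop with in-loop early
-- # returns, B makes three independent declarative passes over the args (find the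
-- # first offending arg, check the required flag with any(), collect paths with a
-- # comprehension); per-verb texts/flags are picked once up front.
--
-- def check_tmp_segment(seg, prefix):
--     """返回 (ok, reason, paths)"""
--     if not prefix:
--         return False, "tmp whitelist disabled (no DIAG_SESSION_ID)", []
--     verb = seg[0].rsplit("/", 1)[-1]
--     if verb == "mktemp":
--         flags = ()
--         need_flag, miss = False, None
--         opt = "mktemp options disallowed: "
--         tgt = "mktemp target not in tmp whitelist: "
--         empty = "mktemp requires explicit template under tmp prefix"
--     elif verb == "tee":
--         flags = ("-a", "--append")
--         need_flag, miss = True, "tee must use -a (naked tee overwrites)"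
--         opt = "tee only allows -a/--append, got: "
--         tgt = "tee target not in tmp whitelist: "
--         empty = "tee needs at least one tmp target"
--     elif verb == "rm":
--         flags = ("-f",)
--         need_flag, miss = False, None
--         opt = "rm only allows -f (no recursive/interactive flags): "
--         tgt = "rm target not in tmp whitelist: "
--         empty = "rm needs at least one tmp target"
--     else:
--         return False, f"verb not tmp-whitelisted: {verb}", []
--     args = seg[1:]
--     bad = next((a for a in args
--                 if a not in flags and (a.startswith("-") or not a.startswith(prefix))),
--                None)
--     if bad is not None:
--         return False, (opt + bad if bad.startswith("-") else tgt + bad), []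
--     if need_flag and not any(a in flags for a in args):
--         return False, miss, []
--     paths = [a for a in args if a not in flags]
--     if not paths:
--         return False, empty, []
--     return True, None, paths
-- ===== Notes on version B (the rewrite author's own statement) =====
-- stated objective: alternative
-- what changed: Replaced A's three per-verb accumulating loops with in-loop early returns by staged declarative passes: find the first offending argument, then an any() check for the required flag, then a filter comprehension collecting the paths.
import Mathlib
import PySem

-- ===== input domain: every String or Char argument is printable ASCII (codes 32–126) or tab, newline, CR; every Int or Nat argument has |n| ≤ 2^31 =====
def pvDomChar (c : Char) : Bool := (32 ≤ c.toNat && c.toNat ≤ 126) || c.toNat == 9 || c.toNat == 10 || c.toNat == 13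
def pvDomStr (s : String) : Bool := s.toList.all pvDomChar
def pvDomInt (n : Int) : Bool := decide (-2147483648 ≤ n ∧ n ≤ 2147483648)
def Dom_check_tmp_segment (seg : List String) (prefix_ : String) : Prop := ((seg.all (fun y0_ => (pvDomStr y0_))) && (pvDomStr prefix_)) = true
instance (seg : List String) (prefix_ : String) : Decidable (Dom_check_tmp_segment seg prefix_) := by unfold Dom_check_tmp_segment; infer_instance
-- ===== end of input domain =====

-- B replaces A's three accumulating per-verb loops (early return inside the loop)
-- by staged declarative passes: find first offender, any() flag check, filter for paths.

-- ===== PORT A =====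
-- s.rsplit("/", 1)[-1] : the part after the last '/' (hand port, exact: with
-- maxsplit=1 from the right the last piece is everything after the last '/',
-- or the whole string if there is no '/').
def pvAfterLastSlash (s : String) : String :=
  String.ofList (s.toList.foldl (fun acc c => if c = '/' then [] else acc ++ [c]) [])

def pvIsTmpPath (token : String) (prefix_ : String) : Bool :=
  decide (prefix_ ≠ "") && decide (token ≠ "") && PySem.Str.startswith token prefix_

def pvLoopMktemp (prefix_ : String) : List String → List String → Bool × Option String × List String
  | [], paths =>
      if paths = [] then (false, some "mktemp requires explicit template under tmp prefix", [])
      else (true, none, paths)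
  | a :: rest, paths =>
      if PySem.Str.startswith a "-" then (false, some ("mktemp options disallowed: " ++ a), [])
      else if !pvIsTmpPath a prefix_ then (false, some ("mktemp target not in tmp whitelist: " ++ a), [])
      else pvLoopMktemp prefix_ rest (paths ++ [a])

def pvLoopTee (prefix_ : String) : List String → Bool → List String → Bool × Option String × List String
  | [], hasAppend, paths =>
      if !hasAppend then (false, some "tee must use -a (naked tee overwrites)", [])
      else if paths = [] then (false, some "tee needs at least one tmp target", [])
      else (true, none, paths)
  | a :: rest, hasAppend, paths =>
      if a = "-a" ∨ a = "--append" then pvLoopTee prefix_ rest true paths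
      else if PySem.Str.startswith a "-" then (false, some ("tee only allows -a/--append, got: " ++ a), [])
      else if !pvIsTmpPath a prefix_ then (false, some ("tee target not in tmp whitelist: " ++ a), [])
      else pvLoopTee prefix_ rest hasAppend (paths ++ [a])

def pvLoopRm (prefix_ : String) : List String → List String → Bool × Option String × List String
  | [], paths =>
      if paths = [] then (false, some "rm needs at least one tmp target", [])
      else (true, none, paths)
  | a :: rest, paths =>
      if a = "-f" then pvLoopRm prefix_ rest paths
      else if PySem.Str.startswith a "-" then (false, some ("rm only allows -f (no recursive/interactive flags): " ++ a), [])
      else if !pvIsTmpPath a prefix_ then (false, some ("rm target not in tmp whitelist: " ++ a), [])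
      else pvLoopRm prefix_ rest (paths ++ [a])

-- seg.headD "" is only read under Pre_ (seg ≠ [] when prefix_ ≠ ""); Python's seg[0]
-- raises IndexError exactly on the inputs Pre_ excludes.
def check_tmp_segment (seg : List String) (prefix_ : String) : Bool × Option String × List String :=
  if prefix_ = "" then (false, some "tmp whitelist disabled (no DIAG_SESSION_ID)", [])
  else
    let verb := pvAfterLastSlash (seg.headD "")
    let args := seg.drop 1
    if verb = "mktemp" then pvLoopMktemp prefix_ args []
    else if verb = "tee" then pvLoopTee prefix_ args false []
    else if verb = "rm" then pvLoopRm prefix_ args []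
    else (false, some ("verb not tmp-whitelisted: " ++ verb), [])

-- ===== PORT B =====
-- Source B's `next((a for a in args if a not in flags and (a.startswith('-') or not a.startswith(prefix))), None)`
def pvFirstBad (prefix_ : String) (flags : List String) (args : List String) : Option String :=
  args.find? (fun a => !(flags.contains a) &&
    (PySem.Str.startswith a "-" || !PySem.Str.startswith a prefix_))

-- the staged tail of Source B after the per-verb configuration is chosen
def pvStaged (prefix_ : String) (flags : List String) (needFlag : Bool)
    (miss opt tgt empty_ : String) (args : List String) : Bool × Option String × List String :=
  match pvFirstBad prefix_ flags args with
  | some bad =>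
      (false, some (if PySem.Str.startswith bad "-" then opt ++ bad else tgt ++ bad), [])
  | none =>
      if needFlag && !(args.any (fun a => flags.contains a)) then (false, some miss, [])
      else
        let paths := args.filter (fun a => !(flags.contains a))
        if paths = [] then (false, some empty_, []) else (true, none, paths)

def check_tmp_segment_alt (seg : List String) (prefix_ : String) : Bool × Option String × List String :=
  if prefix_ = "" then (false, some "tmp whitelist disabled (no DIAG_SESSION_ID)", [])
  else
    let verb := pvAfterLastSlash (seg.headD "")
    if verb = "mktemp" then
      pvStaged prefix_ [] false ""
        "mktemp options disallowed: "
        "mktemp target not in tmp whitelist: "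
        "mktemp requires explicit template under tmp prefix" (seg.drop 1)
    else if verb = "tee" then
      pvStaged prefix_ ["-a", "--append"] true
        "tee must use -a (naked tee overwrites)"
        "tee only allows -a/--append, got: "
        "tee target not in tmp whitelist: "
        "tee needs at least one tmp target" (seg.drop 1)
    else if verb = "rm" then
      pvStaged prefix_ ["-f"] false ""
        "rm only allows -f (no recursive/interactive flags): "
        "rm target not in tmp whitelist: "
        "rm needs at least one tmp target" (seg.drop 1)
    else (false, some ("verb not tmp-whitelisted: " ++ verb), [])

-- ===== PRECONDITION & SPEC =====
-- Pre_ excludes only the inputs where A raises IndexError (seg[0] with seg = []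
-- while the prefix is nonempty); B raises there too.
def Pre_check_tmp_segment (seg : List String) (prefix_ : String) : Prop :=
  prefix_ = "" ∨ seg ≠ []
instance (seg : List String) (prefix_ : String) : Decidable (Pre_check_tmp_segment seg prefix_) := by
  unfold Pre_check_tmp_segment; infer_instance

def pvWitness_check_tmp_segment : List String × String := (["tee", "-a", "/tmp/d/x"], "/tmp/d")

def Spec_check_tmp_segment (seg : List String) (prefix_ : String) (out : Bool × Option String × List String) : Prop := out = check_tmp_segment_alt seg prefix_
instance (seg : List String) (prefix_ : String) (out : Bool × Option String × List String) : Decidable (Spec_check_tmp_segment seg prefix_ out) := by unfold Spec_check_tmp_segment; infer_instance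

-- ===== CLAIM (what is proved, stated in full; the proofs are below) =====
def Claim_equal_check_tmp_segment : Prop := ∀ (seg : List String) (prefix_ : String), Dom_check_tmp_segment seg prefix_ → Pre_check_tmp_segment seg prefix_ → Spec_check_tmp_segment seg prefix_ (check_tmp_segment seg prefix_)

-- ===== LEMMAS AND PROOFS =====

-- a nonempty pattern never prefixes the empty string, so A's `token ≠ ""` test is redundant
theorem pvIsTmpPath_eq (a prefix_ : String) (hp : prefix_ ≠ "") :
    pvIsTmpPath a prefix_ = PySem.Str.startswith a prefix_ := by
  by_cases ha : a = ""
  · subst ha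
    simp [pvIsTmpPath, hp]
    rw [Bool.eq_false_iff]
    intro h
    exact hp (String.toList_eq_nil_iff.mp
      (List.prefix_nil.mp ((PySem.Chars.startswith_iff _ _).mp h)))
  · simp [pvIsTmpPath, hp, ha]

-- the staged computation, generalized over the loop accumulators
theorem pvStaged_acc_mktemp (prefix_ : String) (hp : prefix_ ≠ "") :
    ∀ (args paths : List String),
      pvLoopMktemp prefix_ args paths =
        (match pvFirstBad prefix_ [] args with
        | some bad =>
            (false, some (if PySem.Str.startswith bad "-" then
                "mktemp options disallowed: " ++ bad
              else "mktemp target not in tmp whitelist: " ++ bad), [])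
        | none =>
            if (paths ++ args.filter (fun a => !(List.contains [] a))) = [] then
              (false, some "mktemp requires explicit template under tmp prefix", [])
            else (true, none, paths ++ args.filter (fun a => !(List.contains [] a)))) := by
  intro args
  induction args with
  | nil => intro paths; simp [pvLoopMktemp, pvFirstBad]
  | cons a rest ih =>
      intro paths
      simp only [pvLoopMktemp, pvIsTmpPath_eq a prefix_ hp, pvFirstBad, List.find?_cons,
        List.filter_cons, List.contains_eq_mem, List.not_mem_nil, decide_false,
        Bool.not_false, Bool.true_and, PySem.Str.startswith_eq]
      cases h1 : PySem.Chars.startswith a.toList ['-'] with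
      | true => simp [h1]
      | false =>
        cases h2 : PySem.Chars.startswith a.toList prefix_.toList with
        | false => simp [h1]
        | true =>
            simpa [pvFirstBad, h1, h2, List.append_assoc] using ih (paths ++ [a])

theorem pvStaged_acc_tee (prefix_ : String) (hp : prefix_ ≠ "") :
    ∀ (args : List String) (seen : Bool) (paths : List String),
      pvLoopTee prefix_ args seen paths =
        (match pvFirstBad prefix_ ["-a", "--append"] args with
        | some bad =>
            (false, some (if PySem.Str.startswith bad "-" then
                "tee only allows -a/--append, got: " ++ bad
              else "tee target not in tmp whitelist: " ++ bad), [])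
        | none =>
            if !(seen || args.any (fun a => List.contains ["-a", "--append"] a)) then
              (false, some "tee must use -a (naked tee overwrites)", [])
            else if (paths ++ args.filter (fun a => !(List.contains ["-a", "--append"] a))) = [] then
              (false, some "tee needs at least one tmp target", [])
            else (true, none, paths ++ args.filter (fun a => !(List.contains ["-a", "--append"] a)))) := by
  intro args
  induction args with
  | nil => intro seen paths; simp [pvLoopTee, pvFirstBad]
  | cons a rest ih =>
      intro seen paths
      by_cases hm : a = "-a" ∨ a = "--append"
      · have hm' : List.contains ["-a", "--append"] a = true := by
          rcases hm with h | h <;> simp [h]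
        simp only [pvLoopTee, if_pos hm, pvFirstBad, List.find?_cons, hm',
          Bool.not_true, Bool.false_and, List.filter_cons, List.any_cons, Bool.true_or,
          Bool.or_true]
        simpa [pvFirstBad] using ih true paths
      · have hm' : List.contains ["-a", "--append"] a = false := by
          simp only [List.contains_eq_mem, List.mem_cons, List.not_mem_nil, or_false]
          simpa using hm
        simp only [pvLoopTee, if_neg hm, pvIsTmpPath_eq a prefix_ hp, pvFirstBad,
          List.find?_cons, hm', Bool.not_false, Bool.true_and, List.filter_cons,
          List.any_cons, Bool.false_or, PySem.Str.startswith_eq]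
        cases h1 : PySem.Chars.startswith a.toList ['-'] with
        | true => simp [h1]
        | false =>
          cases h2 : PySem.Chars.startswith a.toList prefix_.toList with
          | false => simp [h1]
          | true =>
              simpa [pvFirstBad, h1, h2, List.append_assoc] using ih seen (paths ++ [a])

theorem pvStaged_acc_rm (prefix_ : String) (hp : prefix_ ≠ "") :
    ∀ (args paths : List String),
      pvLoopRm prefix_ args paths =
        (match pvFirstBad prefix_ ["-f"] args with
        | some bad =>
            (false, some (if PySem.Str.startswith bad "-" then
                "rm only allows -f (no recursive/interactive flags): " ++ bad
              else "rm target not in tmp whitelist: " ++ bad), [])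
        | none =>
            if (paths ++ args.filter (fun a => !(List.contains ["-f"] a))) = [] then
              (false, some "rm needs at least one tmp target", [])
            else (true, none, paths ++ args.filter (fun a => !(List.contains ["-f"] a)))) := by
  intro args
  induction args with
  | nil => intro paths; simp [pvLoopRm, pvFirstBad]
  | cons a rest ih =>
      intro paths
      by_cases hm : a = "-f"
      · have hm' : List.contains ["-f"] a = true := by simp [hm]
        simp only [pvLoopRm, if_pos hm, pvFirstBad, List.find?_cons, hm',
          Bool.not_true, Bool.false_and, List.filter_cons]
        simpa [pvFirstBad] using ih paths
      · have hm' : List.contains ["-f"] a = false := by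
          simp only [List.contains_eq_mem, List.mem_cons, List.not_mem_nil, or_false]
          simpa using hm
        simp only [pvLoopRm, if_neg hm, pvIsTmpPath_eq a prefix_ hp, pvFirstBad,
          List.find?_cons, hm', Bool.not_false, Bool.true_and, List.filter_cons,
          PySem.Str.startswith_eq]
        cases h1 : PySem.Chars.startswith a.toList ['-'] with
        | true => simp [h1]
        | false =>
          cases h2 : PySem.Chars.startswith a.toList prefix_.toList with
          | false => simp [h1]
          | true =>
              simpa [pvFirstBad, h1, h2, List.append_assoc] using ih (paths ++ [a])

-- ===== VERDICT (by name: the statement is the Claim_ definition above) =====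
theorem check_tmp_segment_spec : Claim_equal_check_tmp_segment := by
  intro seg prefix_ _ _
  unfold Spec_check_tmp_segment check_tmp_segment check_tmp_segment_alt
  by_cases hp : prefix_ = ""
  · simp [hp]
  · simp only [hp, if_false]
    set verb := pvAfterLastSlash (seg.headD "") with hv
    by_cases h1 : verb = "mktemp"
    · simp only [h1]
      rw [pvStaged_acc_mktemp prefix_ hp]
      simp [pvStaged]
    · by_cases h2 : verb = "tee"
      · simp only [h2]
        rw [pvStaged_acc_tee prefix_ hp]
        simp [pvStaged]
      · by_cases h3 : verb = "rm"
        · simp only [h3]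
          rw [pvStaged_acc_rm prefix_ hp]
          simp [pvStaged]
        · simp [if_neg h1, if_neg h2, if_neg h3]
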